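-- pv_equiv track=rewrite | github.com/little2/ronin | vendor/class_lycode.py | convert_string_to_utf32_chars
-- ===== SOURCE A (Python) =====
-- def convert_string_to_utf32_chars(input_string):
--     binary_string = ''.join(format(ord(char), '07b') for char in input_string)
--     chunks = [binary_string[i:i+14] for i in range(0, len(binary_string), 14)]
--     base_value = int('00000000000000000100111000000000', 2)
--     utf32_chunks = []
--
--     for chunk in chunks:
--         chunk_value = int(chunk.ljust(14, '0'), 2)
--         utf32_value = base_value + chunk_value
--         utf32_chunks.append(format(utf32_value, '032b'))
--
--     utf32_chars = []
--     for utf32_chunk in utf32_chunks: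
--         decimal_value = int(utf32_chunk, 2)
--         if decimal_value <= 0x10FFFF:
--             utf32_chars.append(chr(decimal_value))
--         else:
--             utf32_chars.append('�')
--
--     return ''.join(utf32_chars)
-- ===== SOURCE B (Python) =====
-- def convert_string_to_utf32_chars(input_string):
--     out = []
--     buf = 0
--     nbits = 0
--     for c in input_string:
--         w = max(7, ord(c).bit_length())
--         buf = (buf << w) + ord(c)
--         nbits += w
--         while nbits >= 14:
--             nbits -= 14
--             out.append(chr(19968 + (buf >> nbits)))
--             buf &= (1 << nbits) - 1
--     if nbits:
--         out.append(chr(19968 + (buf << (14 - nbits))))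
--     return ''.join(out)
-- ===== Notes on version B (the rewrite author's own statement) =====
-- stated objective: faster
-- what changed: B streams the input once through an integer bit-buffer (shift in 7+ bits per char, pop 14-bit chunks as they fill), instead of materialising the full binary string, the chunk list and 032b-formatted strings that A builds and re-parses.
import Mathlib
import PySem

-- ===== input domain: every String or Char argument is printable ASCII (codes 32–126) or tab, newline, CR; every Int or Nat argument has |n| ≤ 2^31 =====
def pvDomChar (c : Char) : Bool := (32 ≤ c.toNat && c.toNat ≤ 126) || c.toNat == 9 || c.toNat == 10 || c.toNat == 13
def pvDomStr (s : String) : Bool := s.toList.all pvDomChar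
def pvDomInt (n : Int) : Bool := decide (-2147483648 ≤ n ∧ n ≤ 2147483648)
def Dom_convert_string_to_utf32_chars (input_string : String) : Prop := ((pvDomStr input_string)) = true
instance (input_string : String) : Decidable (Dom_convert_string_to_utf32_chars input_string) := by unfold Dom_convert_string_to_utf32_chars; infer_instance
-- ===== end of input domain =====

-- B replaces A's build-binary-string / slice-into-chunks / format-and-reparse pipeline with a
-- single streaming pass over the characters maintaining an integer bit-buffer (same return value).

-- ===== PORT A =====

-- binary digits of n, msb first, no leading zeros ([] for 0); helper of pvFormatBin
def pvGoBits : Nat → List Char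
  | 0 => []
  | (n+1) => pvGoBits ((n+1) / 2) ++ [if (n+1) % 2 = 1 then '1' else '0']
decreasing_by exact Nat.div_lt_self (Nat.succ_pos n) (by norm_num)

-- format(n, '0kb'): binary of n left-padded with '0' to width k (exact for n ≥ 0)
def pvFormatBin (k n : Nat) : List Char :=
  let b := if n = 0 then ['0'] else pvGoBits n
  List.replicate (k - b.length) '0' ++ b

-- int(l, 2) for a list of '0'/'1' chars (exact on such inputs)
def pvParseBin (l : List Char) : Nat :=
  l.foldl (fun a c => 2 * a + (if c = '1' then 1 else 0)) 0

-- [s[i:i+14] for i in range(0, len(s), 14)]: the successive 14-element slices of s (exact)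
def pvChunks14 : List Char → List (List Char)
  | [] => []
  | l@(_ :: _) => l.take 14 :: pvChunks14 (l.drop 14)
termination_by l => l.length
decreasing_by subst_vars; simp

-- chunk.ljust(14, '0')
def pvLjust14 (l : List Char) : List Char := l ++ List.replicate (14 - l.length) '0'

def convert_string_to_utf32_chars (input_string : String) : String :=
  let binary_string := (input_string.toList.map (fun c => pvFormatBin 7 c.toNat)).flatten
  let chunks := pvChunks14 binary_string
  let base_value := pvParseBin "00000000000000000100111000000000".toList
  let utf32_chunks := chunks.map (fun chunk => pvFormatBin 32 (base_value + pvParseBin (pvLjust14 chunk)))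
  let utf32_chars := utf32_chunks.map (fun uc =>
    let decimal_value := pvParseBin uc
    if decimal_value ≤ 0x10FFFF then Char.ofNat decimal_value else '�')
  String.mk utf32_chars

-- ===== PORT B =====

-- ord(c).bit_length()
def pvBitLen : Nat → Nat
  | 0 => 0
  | (n+1) => pvBitLen ((n+1) / 2) + 1
decreasing_by exact Nat.div_lt_self (Nat.succ_pos n) (by norm_num)

-- the inner `while nbits >= 14` loop: pops full 14-bit chunks off the top of the buffer
def pvEmit (buf nbits : Nat) (acc : List Char) : List Char × Nat × Nat :=
  if 14 ≤ nbits then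
    let nb := nbits - 14
    pvEmit (buf % 2 ^ nb) nb (acc ++ [Char.ofNat (19968 + buf / 2 ^ nb)])
  else (acc, buf, nbits)
decreasing_by omega

-- the main `for c in input_string` loop with the trailing flush
def pvAltGo : List Char → Nat → Nat → List Char → List Char
  | [], buf, nbits, acc =>
      if nbits ≠ 0 then acc ++ [Char.ofNat (19968 + buf * 2 ^ (14 - nbits))] else acc
  | c :: cs, buf, nbits, acc =>
      let w := max 7 (pvBitLen c.toNat)
      let buf' := buf * 2 ^ w + c.toNat
      let r := pvEmit buf' (nbits + w) acc
      pvAltGo cs r.2.1 r.2.2 r.1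

def convert_string_to_utf32_chars_alt (input_string : String) : String :=
  String.mk (pvAltGo input_string.toList 0 0 [])

-- ===== PRECONDITION & SPEC =====
def Spec_convert_string_to_utf32_chars (input_string : String) (out : String) : Prop := out = convert_string_to_utf32_chars_alt input_string
instance (input_string : String) (out : String) : Decidable (Spec_convert_string_to_utf32_chars input_string out) := by unfold Spec_convert_string_to_utf32_chars; infer_instance

-- ===== CLAIM (what is proved, stated in full; the proofs are below) =====
def Claim_equal_convert_string_to_utf32_chars : Prop := ∀ (input_string : String), Dom_convert_string_to_utf32_chars input_string → Spec_convert_string_to_utf32_chars input_string (convert_string_to_utf32_chars input_string)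

-- ===== LEMMAS AND PROOFS =====

-- common reference: consume characters two at a time, 14 bits per output char
def pvPairs : List Char → List Char
  | [] => []
  | [a] => [Char.ofNat (19968 + a.toNat * 128)]
  | a :: b :: rest => Char.ofNat (19968 + (a.toNat * 128 + b.toNat)) :: pvPairs rest

lemma pvParseBin_go (l : List Char) (a : Nat) :
    l.foldl (fun a c => 2 * a + (if c = '1' then 1 else 0)) a = a * 2 ^ l.length + pvParseBin l := by
  induction l generalizing a with
  | nil => simp [pvParseBin]
  | cons c t ih =>
      simp only [List.foldl_cons, pvParseBin, List.length_cons] at *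
      rw [ih, ih (2 * 0 + _)]
      ring

lemma pvParseBin_append (l1 l2 : List Char) :
    pvParseBin (l1 ++ l2) = pvParseBin l1 * 2 ^ l2.length + pvParseBin l2 := by
  simp only [pvParseBin, List.foldl_append]
  rw [pvParseBin_go]
  rfl

lemma pvParseBin_replicate_zero (k : Nat) : pvParseBin (List.replicate k '0') = 0 := by
  induction k with
  | zero => rfl
  | succ n ih => simpa [pvParseBin, List.replicate_succ, List.foldl_cons] using ih

lemma pvParseBin_goBits (n : Nat) : pvParseBin (pvGoBits n) = n := by
  induction n using Nat.strong_induction_on with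
  | _ n ih =>
      match n with
      | 0 => simp [pvGoBits, pvParseBin]
      | (m+1) =>
          rw [pvGoBits, pvParseBin_append, ih ((m+1)/2) (Nat.div_lt_self (Nat.succ_pos m) (by norm_num))]
          rcases Nat.even_or_odd (m+1) with h | h
          · have h2 : (m+1) % 2 = 0 := Nat.even_iff.mp h
            simp [h2, pvParseBin, List.foldl]
            omega
          · have h2 : (m+1) % 2 = 1 := Nat.odd_iff.mp h
            simp [h2, pvParseBin, List.foldl]
            omega

lemma pvParseBin_formatBin (k n : Nat) : pvParseBin (pvFormatBin k n) = n := by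
  unfold pvFormatBin
  rw [pvParseBin_append, pvParseBin_replicate_zero, Nat.zero_mul, Nat.zero_add]
  by_cases h : n = 0
  · simp [h, pvParseBin]
  · simp [h, pvParseBin_goBits]

lemma pvGoBits_length (n : Nat) : (pvGoBits n).length = pvBitLen n := by
  induction n using Nat.strong_induction_on with
  | _ n ih =>
      match n with
      | 0 => simp [pvGoBits, pvBitLen]
      | (m+1) =>
          rw [pvGoBits, pvBitLen]
          simp [ih ((m+1)/2) (Nat.div_lt_self (Nat.succ_pos m) (by norm_num))]

lemma pvBitLen_le (k n : Nat) (h : n < 2 ^ k) : pvBitLen n ≤ k := by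
  induction k generalizing n with
  | zero =>
      interval_cases n
      simp [pvBitLen]
  | succ k ih =>
      match n with
      | 0 => simp [pvBitLen]
      | (m+1) =>
          rw [pvBitLen]
          have : (m+1)/2 < 2 ^ k := by
            rw [pow_succ] at h
            omega
          exact Nat.succ_le_succ (ih _ this)

lemma pvFormatBin7_length (n : Nat) (h : n < 128) : (pvFormatBin 7 n).length = 7 := by
  unfold pvFormatBin
  by_cases h0 : n = 0
  · simp [h0]
  · have hb : (pvGoBits n).length ≤ 7 := by
      rw [pvGoBits_length]
      exact pvBitLen_le 7 n (by norm_num [h])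
    simp [h0]
    omega

lemma pvChunks14_nil : pvChunks14 [] = [] := by
  rw [pvChunks14.eq_def]

lemma pvChunks14_ne (l : List Char) (h : l ≠ []) :
    pvChunks14 l = l.take 14 :: pvChunks14 (l.drop 14) := by
  match l with
  | [] => exact absurd rfl h
  | x :: xs => rw [pvChunks14.eq_def]

lemma pvChunks14_prefix (p s : List Char) (hp : p.length = 14) :
    pvChunks14 (p ++ s) = p :: pvChunks14 s := by
  have hne : p ++ s ≠ [] := by
    intro h
    have := congrArg List.length h
    simp [hp] at this
  rw [pvChunks14_ne _ hne,
      List.take_append_of_le_length (by omega),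
      List.drop_append_of_le_length (by omega),
      List.take_of_length_le (by omega), List.drop_of_length_le (by omega)]
  simp

-- the A-side pipeline equals pvPairs
lemma pvA_pairs (cs : List Char) (h : ∀ c ∈ cs, c.toNat < 128) :
    ((pvChunks14 ((cs.map (fun c => pvFormatBin 7 c.toNat)).flatten)).map
      (fun chunk => pvFormatBin 32 (pvParseBin "00000000000000000100111000000000".toList + pvParseBin (pvLjust14 chunk)))).map
      (fun uc => let d := pvParseBin uc; if d ≤ 0x10FFFF then Char.ofNat d else '�')
    = pvPairs cs := by
  induction cs using pvPairs.induct with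
  | case1 => simp [pvChunks14_nil, pvPairs]
  | case2 a =>
      have ha : a.toNat < 128 := h a (by simp)
      have hlen := pvFormatBin7_length a.toNat ha
      have hpa : pvParseBin (pvFormatBin 7 a.toNat) = a.toNat := pvParseBin_formatBin 7 a.toNat
      simp only [List.map_cons, List.map_nil, List.flatten_cons, List.flatten_nil, List.append_nil]
      rw [show pvChunks14 (pvFormatBin 7 a.toNat) = [pvFormatBin 7 a.toNat] from by
        have hne : pvFormatBin 7 a.toNat ≠ [] := by
          intro hm; rw [hm] at hlen; simp at hlen
        rw [pvChunks14_ne _ hne,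
            List.take_of_length_le (by omega), List.drop_of_length_le (by omega)]
        simp [pvChunks14_nil]]
      simp only [List.map_cons, List.map_nil, pvLjust14, hlen]
      rw [pvParseBin_append, hpa, pvParseBin_replicate_zero]
      have hlt : pvParseBin "00000000000000000100111000000000".toList + (a.toNat * 2 ^ (List.replicate (14 - 7) '0').length + 0) ≤ 0x10FFFF := by
        have : pvParseBin "00000000000000000100111000000000".toList = 19968 := by decide
        rw [this]
        simp
        omega
      rw [pvParseBin_formatBin]
      simp only [pvPairs]
      rw [if_pos hlt]
      have : pvParseBin "00000000000000000100111000000000".toList = 19968 := by decide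
      rw [this]
      simp
  | case3 a b rest ih =>
      have ha : a.toNat < 128 := h a (by simp)
      have hb : b.toNat < 128 := h b (by simp)
      have hla := pvFormatBin7_length a.toNat ha
      have hlb := pvFormatBin7_length b.toNat hb
      simp only [List.map_cons, List.flatten_cons, ← List.append_assoc]
      rw [show pvFormatBin 7 a.toNat ++ pvFormatBin 7 b.toNat ++ (rest.map (fun c => pvFormatBin 7 c.toNat)).flatten
            = (pvFormatBin 7 a.toNat ++ pvFormatBin 7 b.toNat) ++ (rest.map (fun c => pvFormatBin 7 c.toNat)).flatten from by simp]
      rw [pvChunks14_prefix _ _ (by simp [hla, hlb])]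
      simp only [List.map_cons]
      rw [ih (fun c hc => h c (by simp [hc]))]
      have hl14 : (pvFormatBin 7 a.toNat ++ pvFormatBin 7 b.toNat).length = 14 := by simp [hla, hlb]
      have hlj : pvLjust14 (pvFormatBin 7 a.toNat ++ pvFormatBin 7 b.toNat) = pvFormatBin 7 a.toNat ++ pvFormatBin 7 b.toNat := by
        unfold pvLjust14
        rw [hl14]
        simp
      rw [hlj, pvParseBin_append, pvFormatBin7_length b.toNat hb,
          pvParseBin_formatBin, pvParseBin_formatBin, pvParseBin_formatBin]
      have hbase : pvParseBin "00000000000000000100111000000000".toList = 19968 := by decide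
      rw [hbase]
      simp only [pvPairs]
      rw [if_pos (by omega)]
      norm_num

-- one pvEmit step when exactly one chunk is available
lemma pvEmit_14 (buf : Nat) (acc : List Char) (h : buf < 2 ^ 14) :
    pvEmit buf 14 acc = (acc ++ [Char.ofNat (19968 + buf)], 0, 0) := by
  rw [pvEmit]
  simp only [show (14:Nat) ≤ 14 from le_refl _, if_true]
  rw [pvEmit]
  norm_num
  omega

lemma pvEmit_lt (buf nbits : Nat) (acc : List Char) (h : nbits < 14) :
    pvEmit buf nbits acc = (acc, buf, nbits) := by
  rw [pvEmit]
  simp [Nat.not_le.mpr h]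

-- the B-side loop equals pvPairs
lemma pvAltGo_pairs (cs : List Char) (acc : List Char) (h : ∀ c ∈ cs, c.toNat < 128) :
    pvAltGo cs 0 0 acc = acc ++ pvPairs cs := by
  induction cs using pvPairs.induct generalizing acc with
  | case1 => simp [pvAltGo, pvPairs]
  | case2 a =>
      have ha : a.toNat < 128 := h a (by simp)
      have hw : max 7 (pvBitLen a.toNat) = 7 := by
        have := pvBitLen_le 7 a.toNat (by norm_num [ha])
        omega
      simp only [pvAltGo, hw]
      rw [pvEmit_lt _ _ _ (by omega)]
      simp [pvAltGo, pvPairs]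
  | case3 a b rest ih =>
      have ha : a.toNat < 128 := h a (by simp)
      have hb : b.toNat < 128 := h b (by simp)
      have hwa : max 7 (pvBitLen a.toNat) = 7 := by
        have := pvBitLen_le 7 a.toNat (by norm_num [ha]); omega
      have hwb : max 7 (pvBitLen b.toNat) = 7 := by
        have := pvBitLen_le 7 b.toNat (by norm_num [hb]); omega
      have e1 : pvEmit (0 * 2 ^ 7 + a.toNat) (0 + 7) acc = (acc, 0 * 2 ^ 7 + a.toNat, 0 + 7) :=
        pvEmit_lt _ _ _ (by omega)
      have e2 : pvEmit ((0 * 2 ^ 7 + a.toNat) * 2 ^ 7 + b.toNat) (0 + 7 + 7) acc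
          = (acc ++ [Char.ofNat (19968 + ((0 * 2 ^ 7 + a.toNat) * 2 ^ 7 + b.toNat))], 0, 0) := by
        rw [show (0:Nat) + 7 + 7 = 14 from by norm_num]
        rw [pvEmit_14 _ _ (by norm_num; omega)]
      simp only [pvAltGo, hwa, hwb, e1, e2]
      rw [ih _ (fun c hc => h c (by simp [hc]))]
      simp [pvPairs]

-- ===== VERDICT (by name: the statement is the Claim_ definition above) =====
theorem convert_string_to_utf32_chars_spec : Claim_equal_convert_string_to_utf32_chars := by
  intro s hdom
  unfold Spec_convert_string_to_utf32_chars
  have h : ∀ c ∈ s.toList, c.toNat < 128 := by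
    intro c hc
    have := List.all_eq_true.mp hdom c hc
    simp only [pvDomChar, Bool.or_eq_true, Bool.and_eq_true, decide_eq_true_eq, beq_iff_eq] at this
    omega
  unfold convert_string_to_utf32_chars convert_string_to_utf32_chars_alt
  rw [pvAltGo_pairs s.toList [] h]
  simp only [List.nil_append]
  exact congrArg String.mk (pvA_pairs s.toList h)
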